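-- pv_equiv track=rewrite | github.com/pypi-data/pypi-mirror-338 | packages/git-ai-toolkit/git_ai_toolkit-0.2.4.tar.gz/git_ai_toolkit-0.2.4/ai_toolkit/git_diff.py | parse_commit_message
-- ===== SOURCE A (Python) =====
-- def parse_commit_message(message):
--     """Parse and structure the AI-generated commit message."""
--     lines = message.strip().split('\n')
--     if not lines:
--         return {"subject": "", "body": ""}
--
--     # Extract the subject line (first line)
--     subject = lines[0].strip()
--
--     # Extract commit type if present
--     commit_type = "unknown"
--     type_prefixes = ["feat", "fix", "docs", "style", "refactor", "perf", "test", "chore"]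
--     for prefix in type_prefixes:
--         if subject.startswith(f"{prefix}:") or subject.startswith(f"{prefix}("):
--             commit_type = prefix
--             break
--
--     # Extract body (everything after first line)
--     body = "\n".join(lines[1:]).strip()
--     if body and not lines[1]:  # Ensure proper formatting with blank line after subject
--         body = body.lstrip('\n')
--
--     return {
--         "subject": subject,
--         "body": body,
--         "type": commit_type,
--         "full_message": message.strip()
--     }
-- ===== SOURCE B (Python) =====
-- CONVENTIONAL_TYPES = {"feat", "fix", "docs", "style", "refactor", "perf", "test", "chore"}
--
--
-- def parse_commit_message(message):
--     """Parse and structure the AI-generated commit message."""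
--     full = message.strip()
--     lines = full.split('\n')
--     subject = lines[0].strip()
--     # Commit type: take the token before the earliest ':' or '(' and look it up.
--     delims = [k for k in (subject.find(':'), subject.find('(')) if k != -1]
--     i = min(delims) if delims else -1
--     commit_type = subject[:i] if i != -1 and subject[:i] in CONVENTIONAL_TYPES else "unknown"
--     body = '\n'.join(lines[1:]).strip()
--     return {"subject": subject, "body": body, "type": commit_type, "full_message": full}
-- ===== Notes on version B (the rewrite author's own statement) =====
-- stated objective: idiomatic
-- what changed: The eight-iteration startswith scan over type_prefixes is replaced by extracting the subject token before the earliest colon or opening parenthesis and one set lookup; the dead empty-list branch and the redundant left-strip of newlines after a full strip are dropped.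
import Mathlib
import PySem

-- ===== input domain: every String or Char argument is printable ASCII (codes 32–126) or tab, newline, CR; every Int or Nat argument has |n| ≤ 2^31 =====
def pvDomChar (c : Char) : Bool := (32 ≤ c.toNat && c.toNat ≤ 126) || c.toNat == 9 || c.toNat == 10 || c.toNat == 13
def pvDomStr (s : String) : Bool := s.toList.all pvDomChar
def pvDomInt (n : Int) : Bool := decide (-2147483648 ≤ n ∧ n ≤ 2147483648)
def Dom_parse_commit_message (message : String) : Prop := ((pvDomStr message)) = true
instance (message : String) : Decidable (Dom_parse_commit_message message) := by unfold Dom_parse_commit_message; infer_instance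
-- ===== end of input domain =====

-- B replaces A's eight-iteration startswith scan by extracting the subject token before the
-- earliest colon or opening parenthesis and one set lookup (objective: idiomatic).

-- ===== PORT A =====
-- A's for-loop with break over type_prefixes
def pvTypeScan (subject : List Char) : List String → List Char
  | [] => "unknown".toList
  | p :: ps =>
    if PySem.Chars.startswith subject (p.toList ++ [':'])
        || PySem.Chars.startswith subject (p.toList ++ ['(']) then p.toList
    else pvTypeScan subject ps

def parse_commit_message (message : String) : List (String × String) :=
  let full := PySem.Chars.strip message.toList
  let lines := PySem.Chars.splitOn full ['\n']
  if lines = [] then [("subject", ""), ("body", "")]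
  else
    let subject := PySem.Chars.strip (lines.headD [])   -- lines[0] (guarded nonempty)
    let commit_type :=
      pvTypeScan subject ["feat", "fix", "docs", "style", "refactor", "perf", "test", "chore"]
    let body0 := PySem.Chars.strip (PySem.Chars.join ['\n'] (lines.drop 1))
    -- 'if body and not lines[1]': lines[1] is only read when body is nonempty (then it exists)
    let body := if body0 ≠ [] ∧ PySem.List.pyGet? lines 1 = some [] then
        body0.dropWhile (· == '\n')   -- body.lstrip('\n'): exact (PySem has no one-sided stripChars)
      else body0
    [("subject", String.ofList subject), ("body", String.ofList body),
     ("type", String.ofList commit_type), ("full_message", String.ofList full)]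

-- ===== PORT B =====
def pvConventionalTypes : List String :=
  ["feat", "fix", "docs", "style", "refactor", "perf", "test", "chore"]

def parse_commit_message_alt (message : String) : List (String × String) :=
  let full := PySem.Chars.strip message.toList
  let lines := PySem.Chars.splitOn full ['\n']
  let subject := PySem.Chars.strip (lines.headD [])   -- lines[0] (split is never empty)
  let delims := [PySem.Chars.find subject [':'], PySem.Chars.find subject ['(']].filter
      (fun k => k != -1)
  let i := (delims.min?).getD (-1)   -- min(delims) if delims else -1
  let commit_type :=
    if i ≠ -1 ∧ (PySem.Set.ofList (pvConventionalTypes.map String.toList)).contains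
        (PySem.Chars.slice subject none (some i)) then
      PySem.Chars.slice subject none (some i)
    else "unknown".toList
  let body := PySem.Chars.strip (PySem.Chars.join ['\n'] (lines.drop 1))
  [("subject", String.ofList subject), ("body", String.ofList body),
   ("type", String.ofList commit_type), ("full_message", String.ofList full)]

-- ===== PRECONDITION & SPEC =====
def Spec_parse_commit_message (message : String) (out : List (String × String)) : Prop := out = parse_commit_message_alt message
instance (message : String) (out : List (String × String)) : Decidable (Spec_parse_commit_message message out) := by unfold Spec_parse_commit_message; infer_instance

-- ===== CLAIM (what is proved, stated in full; the proofs are below) =====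
def Claim_equal_parse_commit_message : Prop := ∀ (message : String), Dom_parse_commit_message message → Spec_parse_commit_message message (parse_commit_message message)

-- ===== LEMMAS AND PROOFS =====

lemma splitOn_go_ne_nil (sep : List Char) (fuel : Nat) (l cur : List Char)
    (acc : List (List Char)) : PySem.Chars.splitOn.go sep fuel l cur acc ≠ [] := by
  induction fuel generalizing l cur acc with
  | zero => simp [PySem.Chars.splitOn.go]
  | succ n ih =>
    cases l with
    | nil => simp [PySem.Chars.splitOn.go]
    | cons c rest =>
      rw [PySem.Chars.splitOn.go]
      split
      · exact ih _ _ _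
      · exact ih _ _ _

lemma splitOn_ne_nil (s sep : List Char) : PySem.Chars.splitOn s sep ≠ [] := by
  unfold PySem.Chars.splitOn; exact splitOn_go_ne_nil _ _ _ _ _

lemma dropWhile_head_false {α : Type} (p : α → Bool) (l : List α) (c : α) (t : List α)
    (h : l.dropWhile p = c :: t) : p c = false := by
  induction l with
  | nil => simp at h
  | cons a l ih =>
    rw [List.dropWhile_cons] at h
    split at h
    · exact ih h
    · rename_i hp
      cases h
      simpa using hp

lemma dropWhile_nl_strip (l : List Char) (h : PySem.Chars.strip l ≠ []) :
    (PySem.Chars.strip l).dropWhile (· == '\n') = PySem.Chars.strip l := by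
  obtain ⟨c, t, hct⟩ := List.exists_cons_of_ne_nil h
  have hpre : PySem.Chars.strip l <+: PySem.Chars.lstrip l := by
    unfold PySem.Chars.strip PySem.Chars.rstrip
    have := List.dropWhile_suffix (l := (PySem.Chars.lstrip l).reverse) (p := PySem.Chars.isspace)
    have := List.reverse_prefix.mpr this
    simpa using this
  have hlhead : ∃ t', PySem.Chars.lstrip l = c :: t' := by
    obtain ⟨r, hr⟩ := hpre
    rw [hct] at hr
    exact ⟨t ++ r, by simpa using hr.symm⟩
  obtain ⟨t', ht'⟩ := hlhead
  have hc : PySem.Chars.isspace c = false :=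
    dropWhile_head_false _ _ _ _ (by simpa [PySem.Chars.lstrip] using ht')
  have hcn : (c == '\n') = false := by
    rcases Bool.eq_false_or_eq_true (c == '\n') with h' | h'
    swap
    · exact h'
    · exfalso
      have : c = '\n' := by simpa using h'
      rw [this] at hc
      simp [PySem.Chars.isspace] at hc
  rw [hct, List.dropWhile_cons, hcn]
  simp

lemma single_prefix_iff (c : Char) (t : List Char) : [c] <+: t ↔ t.head? = some c := by
  cases t with
  | nil => simp
  | cons a r => simp [List.cons_prefix_iff]

lemma single_prefix_drop (s : List Char) (c : Char) (i : Nat) :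
    ([c] <+: s.drop i) ↔ s[i]? = some c := by
  rw [single_prefix_iff, List.head?_drop]

lemma find_single_neg (s : List Char) (c : Char) (h : c ∉ s) :
    PySem.Chars.find s [c] = -1 := by
  rw [PySem.Chars.find_eq_neg_one_iff]
  intro hinf
  exact h (hinf.subset (by simp))

lemma find_single_spec (s : List Char) (c : Char) (h : 0 ≤ PySem.Chars.find s [c]) :
    s[(PySem.Chars.find s [c]).toNat]? = some c ∧
      ∀ i < (PySem.Chars.find s [c]).toNat, s[i]? ≠ some c := by
  obtain ⟨h1, h2⟩ := PySem.Chars.find_spec (s := s) (sub := [c]) h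
  refine ⟨(single_prefix_drop s c _).mp h1, fun i hi hc => h2 i hi ?_⟩
  exact (single_prefix_drop s c i).mpr hc

lemma find_single_first (s : List Char) (c : Char) (n : Nat) (hn : s[n]? = some c)
    (hlt : ∀ i < n, s[i]? ≠ some c) : PySem.Chars.find s [c] = n := by
  have hne : PySem.Chars.find s [c] ≠ -1 := by
    rw [PySem.Chars.find_ne_neg_one_iff]
    have : [c] <+: s.drop n := (single_prefix_drop s c n).mpr hn
    exact this.isInfix.trans (List.drop_suffix n s).isInfix
  have hge : 0 ≤ PySem.Chars.find s [c] := by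
    have := PySem.Chars.neg_one_le_find (s := s) (sub := [c])
    omega
  obtain ⟨h1, h2⟩ := find_single_spec s c hge
  have : (PySem.Chars.find s [c]).toNat = n := by
    rcases Nat.lt_trichotomy (PySem.Chars.find s [c]).toNat n with h' | h' | h'
    · exact absurd h1 (hlt _ h')
    · exact h'
    · exact absurd hn (h2 n h')
  omega

def pvBIdx (s : List Char) : Int :=
  ((([PySem.Chars.find s [':'], PySem.Chars.find s ['(']].filter (fun k => k != -1)).min?).getD (-1))

def pvCond (s : List Char) (p : String) : Bool :=
  PySem.Chars.startswith s (p.toList ++ [':']) || PySem.Chars.startswith s (p.toList ++ ['('])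


lemma typeScan_eq_find? (s : List Char) (ps : List String) :
    pvTypeScan s ps = ((ps.find? (pvCond s)).map String.toList).getD "unknown".toList := by
  induction ps with
  | nil => simp [pvTypeScan]
  | cons p ps ih =>
    rw [pvTypeScan, List.find?_cons]
    by_cases h : pvCond s p = true
    · simp only [h]
      rw [if_pos (by simpa [pvCond] using h)]
      simp
    · have h' : pvCond s p = false := by simpa using h
      simp only [h']
      rw [if_neg (by simpa [pvCond] using h)]
      exact ih

-- find of the OTHER delimiter is -1 or past q.length
lemma find_other (s q : List Char) (d e : Char) (r : List Char)
    (hs : s = q ++ d :: r) (hq : ∀ c ∈ q, c ≠ e) (hde : d ≠ e) :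
    PySem.Chars.find s [e] = -1 ∨ (q.length : Int) < PySem.Chars.find s [e] := by
  by_cases hmem : e ∈ s
  · right
    have hge : 0 ≤ PySem.Chars.find s [e] := by
      rw [PySem.Chars.find_nonneg_iff]
      obtain ⟨i, hi, hei⟩ := List.mem_iff_getElem.mp hmem
      exact ((single_prefix_drop s e i).mpr (by simp [hei, List.getElem?_eq_getElem hi])).isInfix.trans
        (List.drop_suffix i s).isInfix
    obtain ⟨h1, _⟩ := find_single_spec s e hge
    set k := (PySem.Chars.find s [e]).toNat with hk
    have hkq : ¬ k < q.length := by
      intro hlt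
      rw [hs] at h1
      rw [List.getElem?_append_left hlt] at h1
      have := List.getElem?_eq_getElem hlt
      rw [this] at h1
      exact hq _ (List.getElem_mem hlt) (by simpa using h1)
    have hkne : k ≠ q.length := by
      intro heq
      rw [hs, heq] at h1
      rw [List.getElem?_append_right (le_refl _)] at h1
      simp at h1
      exact hde h1
    omega
  · left; exact find_single_neg s e hmem

lemma find_d_eq (s q : List Char) (d : Char) (r : List Char) (hs : s = q ++ d :: r)
    (hq : ∀ c ∈ q, c ≠ d) : PySem.Chars.find s [d] = q.length := by
  apply find_single_first
  · rw [hs, List.getElem?_append_right (le_refl _)]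
    simp
  · intro i hi
    rw [hs, List.getElem?_append_left hi, List.getElem?_eq_getElem hi]
    intro hc
    exact hq _ (List.getElem_mem hi) (by simpa using hc)

lemma bhelp_a (n : Int) (hn : 0 ≤ n) :
    (([n, -1].filter (fun k => k != -1)).min?).getD (-1) = n := by
  have h1 : (n != -1) = true := by simp; omega
  simp [List.filter, h1, List.min?]

lemma bhelp_b (n m : Int) (hn : 0 ≤ n) (hm : n < m) :
    (([n, m].filter (fun k => k != -1)).min?).getD (-1) = n := by
  have h1 : (n != -1) = true := by simp; omega
  have h2 : (m != -1) = true := by simp; omega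
  simp [List.filter, h1, h2, List.min?]
  omega

lemma bhelp_c (n : Int) (hn : 0 ≤ n) :
    (([-1, n].filter (fun k => k != -1)).min?).getD (-1) = n := by
  have h1 : (n != -1) = true := by simp; omega
  simp [List.filter, h1, List.min?]

lemma bhelp_d (n m : Int) (hn : 0 ≤ n) (hm : n < m) :
    (([m, n].filter (fun k => k != -1)).min?).getD (-1) = n := by
  have h1 : (n != -1) = true := by simp; omega
  have h2 : (m != -1) = true := by simp; omega
  simp [List.filter, h1, h2, List.min?]
  omega

lemma bIdx_of_match (s q : List Char) (d : Char) (hq : ∀ c ∈ q, c ≠ ':' ∧ c ≠ '(')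
    (hd : d = ':' ∨ d = '(') (hpre : (q ++ [d]) <+: s) : pvBIdx s = (q.length : Int) := by
  obtain ⟨r, hr⟩ := hpre
  have hs : s = q ++ d :: r := by simpa using hr.symm
  rcases hd with hd | hd
  · subst hd
    have hfc : PySem.Chars.find s [':'] = q.length :=
      find_d_eq s q ':' r hs (fun c hc => (hq c hc).1)
    have hfp := find_other s q ':' '(' r hs (fun c hc => (hq c hc).2) (by decide)
    unfold pvBIdx
    rw [hfc]
    rcases hfp with hfp | hfp
    · rw [hfp]
      exact bhelp_a _ (by omega)
    · rw [show PySem.Chars.find s ['('] = ((PySem.Chars.find s ['(']).toNat : Int) by omega] at hfp ⊢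
      exact bhelp_b _ _ (by omega) hfp
  · subst hd
    have hfp : PySem.Chars.find s ['('] = q.length :=
      find_d_eq s q '(' r hs (fun c hc => (hq c hc).2)
    have hfc := find_other s q '(' ':' r hs (fun c hc => (hq c hc).1) (by decide)
    unfold pvBIdx
    rw [hfp]
    rcases hfc with hfc | hfc
    · rw [hfc]
      exact bhelp_c _ (by omega)
    · rw [show PySem.Chars.find s [':'] = ((PySem.Chars.find s [':']).toNat : Int) by omega] at hfc ⊢
      exact bhelp_d _ _ (by omega) hfc

lemma bIdx_spec (s : List Char) (h : pvBIdx s ≠ -1) :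
    ∃ n : Nat, pvBIdx s = (n : Int) ∧ ∃ d, (d = ':' ∨ d = '(') ∧ s[n]? = some d := by
  unfold pvBIdx at h ⊢
  set L := [PySem.Chars.find s [':'], PySem.Chars.find s ['(']].filter (fun k => k != -1) with hL
  cases hmin : L.min? with
  | none => rw [hmin] at h; simp at h
  | some i =>
    have hiL : i ∈ L := List.min?_mem hmin
    rw [hL] at hiL
    have hne : (i != -1) = true := (List.mem_filter.mp hiL).2
    have hmem : i ∈ [PySem.Chars.find s [':'], PySem.Chars.find s ['(']] := (List.mem_filter.mp hiL).1
    have hge : 0 ≤ i := by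
      simp at hmem
      rcases hmem with hm | hm
      · have := PySem.Chars.neg_one_le_find (s := s) (sub := [':'])
        simp at hne; omega
      · have := PySem.Chars.neg_one_le_find (s := s) (sub := ['('])
        simp at hne; omega
    refine ⟨i.toNat, by simp; omega, ?_⟩
    simp at hmem
    rcases hmem with hm | hm
    · exact ⟨':', Or.inl rfl, by
        have := (find_single_spec s ':' (by omega : 0 ≤ PySem.Chars.find s [':'])).1
        rw [← hm] at this
        exact this⟩
    · exact ⟨'(', Or.inr rfl, by
        have := (find_single_spec s '(' (by omega : 0 ≤ PySem.Chars.find s ['('])).1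
        rw [← hm] at this
        exact this⟩


lemma commit_type_eq (s : List Char) :
    pvTypeScan s ["feat", "fix", "docs", "style", "refactor", "perf", "test", "chore"] =
      (if pvBIdx s ≠ -1 ∧ (PySem.Set.ofList (pvConventionalTypes.map String.toList)).contains
            (PySem.Chars.slice s none (some (pvBIdx s))) = true then
        PySem.Chars.slice s none (some (pvBIdx s))
      else "unknown".toList) := by
  rw [typeScan_eq_find?,
    show (["feat", "fix", "docs", "style", "refactor", "perf", "test", "chore"] : List String)
      = pvConventionalTypes from rfl]
  cases hf : pvConventionalTypes.find? (pvCond s) with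
  | some p =>
    have hcond : pvCond s p = true := List.find?_some hf
    have hmem : p ∈ pvConventionalTypes := List.mem_of_find?_eq_some hf
    have hq : ∀ c ∈ p.toList, c ≠ ':' ∧ c ≠ '(' := by
      have hall : (pvConventionalTypes.all
          (fun p => p.toList.all (fun c => !(c == ':') && !(c == '(')))) = true := by decide
      intro c hc
      have h2 := List.all_eq_true.mp (List.all_eq_true.mp hall p hmem) c hc
      simp at h2
      exact h2
    have hpre : ∃ d, (d = ':' ∨ d = '(') ∧ (p.toList ++ [d]) <+: s := by
      unfold pvCond at hcond
      rcases Bool.or_eq_true_iff.mp hcond with h' | h'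
      · exact ⟨':', Or.inl rfl, (PySem.Chars.startswith_iff _ _).mp h'⟩
      · exact ⟨'(', Or.inr rfl, (PySem.Chars.startswith_iff _ _).mp h'⟩
    obtain ⟨d, hd, hpre⟩ := hpre
    have hb := bIdx_of_match s p.toList d hq hd hpre
    have hslice : PySem.Chars.slice s none (some (pvBIdx s)) = p.toList := by
      rw [hb, PySem.Chars.slice_eq_listSlice,
        PySem.List.slice_to (xs := s) (b := (p.toList.length : Int)) (by omega)]
      obtain ⟨r, hr⟩ := hpre
      rw [← hr, List.append_assoc]
      simp
    rw [if_pos]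
    · simp only [Option.map_some, Option.getD_some]
      exact hslice.symm
    · constructor
      · rw [hb]; simp
      · rw [hslice, PySem.Set.contains_iff, PySem.Set.mem_ofList]
        exact List.mem_map_of_mem hmem
  | none =>
    have hnone : ∀ p ∈ pvConventionalTypes, ¬ pvCond s p = true := by
      simpa [List.find?_eq_none] using hf
    by_cases hb : pvBIdx s = -1
    · rw [if_neg (by simp [hb])]
      simp
    · obtain ⟨n, hbn, d, hd, hsd⟩ := bIdx_spec s hb
      by_cases hc : (PySem.Set.ofList (pvConventionalTypes.map String.toList)).contains
          (PySem.Chars.slice s none (some (pvBIdx s))) = true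
      · exfalso
        rw [PySem.Set.contains_iff, PySem.Set.mem_ofList] at hc
        obtain ⟨p, hpmem, hpeq⟩ := List.mem_map.mp hc
        apply hnone p hpmem
        have hn : n < s.length := by
          by_contra hn
          rw [List.getElem?_eq_none (by omega)] at hsd
          simp at hsd
        have hdrop : s.drop n = d :: s.drop (n + 1) := by
          rw [List.drop_eq_getElem_cons hn]
          congr 1
          have := List.getElem?_eq_getElem hn
          rw [this] at hsd
          simpa using hsd
        have hsplit : s = s.take n ++ d :: s.drop (n + 1) := by
          conv_lhs => rw [← List.take_append_drop n s]
          rw [hdrop]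
        have hptake : p.toList = s.take n := by
          rw [hpeq, hbn, PySem.Chars.slice_eq_listSlice,
            PySem.List.slice_to (xs := s) (b := (n : Int)) (by omega)]
          simp
        have hsw : (p.toList ++ [d]) <+: s := by
          rw [hptake]
          exact ⟨s.drop (n + 1), by
            rw [List.append_assoc, List.singleton_append]
            exact hsplit.symm⟩
        unfold pvCond
        rcases hd with hd | hd
        · subst hd; rw [Bool.or_eq_true_iff]; left; exact (PySem.Chars.startswith_iff _ _).mpr hsw
        · subst hd; rw [Bool.or_eq_true_iff]; right; exact (PySem.Chars.startswith_iff _ _).mpr hsw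
      · rw [if_neg (fun hcc => hc hcc.2)]
        simp

-- ===== VERDICT (by name: the statement is the Claim_ definition above) =====
theorem parse_commit_message_spec : Claim_equal_parse_commit_message := by
  intro message _
  unfold Spec_parse_commit_message
  unfold parse_commit_message parse_commit_message_alt
  simp only []
  set full := PySem.Chars.strip message.toList with hfull
  set lines := PySem.Chars.splitOn full ['\n'] with hlines
  rw [if_neg (splitOn_ne_nil full ['\n'])]
  set subject := PySem.Chars.strip (lines.headD []) with hsubj
  have htype := commit_type_eq subject
  unfold pvBIdx at htype
  rw [htype]
  have hbody : (if (PySem.Chars.strip (PySem.Chars.join ['\n'] (lines.drop 1)) ≠ [] ∧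
        PySem.List.pyGet? lines 1 = some []) then
      (PySem.Chars.strip (PySem.Chars.join ['\n'] (lines.drop 1))).dropWhile (· == '\n')
    else PySem.Chars.strip (PySem.Chars.join ['\n'] (lines.drop 1))) =
      PySem.Chars.strip (PySem.Chars.join ['\n'] (lines.drop 1)) := by
    split_ifs with h
    · exact dropWhile_nl_strip _ h.1
    · rfl
  rw [hbody]
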